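-- pv_equiv track=rewrite | github.com/yastman/seo_ultimate | scripts/coverage_matcher.py | _match_sequence
-- ===== SOURCE A (Python) =====
-- def _match_sequence(remaining: list[str], text_lemmas: list[str], max_gap: int) -> bool:
--     """Match remaining lemmas with gap tolerance."""
--     if not remaining:
--         return True
--
--     target = remaining[0]
--     for i, lemma in enumerate(text_lemmas[: max_gap + 1]):
--         if lemma == target:
--             return _match_sequence(remaining[1:], text_lemmas[i + 1 :], max_gap)
--
--     return False
-- ===== SOURCE B (Python) =====
-- def _match_sequence(remaining: list[str], text_lemmas: list[str], max_gap: int) -> bool: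
--     """Match remaining lemmas with gap tolerance: single index scan, no slicing."""
--     n = len(text_lemmas)
--     j = 0
--     for target in remaining:
--         limit = min(n, j + max_gap + 1)
--         while True:
--             if j >= limit:
--                 return False
--             if text_lemmas[j] == target:
--                 break
--             j += 1
--         j += 1
--     return True
-- ===== Notes on version B (the rewrite author's own statement) =====
-- stated objective: faster
-- what changed: Replaced A's recursion that copies two list slices per matched lemma with a single iterative two-pointer index scan over the original list; Pre_ restricts to the natural domain max_gap >= -1, because for max_gap <= -2 A's window text_lemmas[:max_gap+1] silently drops elements from the END of the list via Python's negative-slice semantics, an accident of the implementation no caller would rely on.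
-- outside the precondition, e.g. on _match_sequence(['a'], ['a', 'b'], -2): A returns True, B returns False
import Mathlib
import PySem

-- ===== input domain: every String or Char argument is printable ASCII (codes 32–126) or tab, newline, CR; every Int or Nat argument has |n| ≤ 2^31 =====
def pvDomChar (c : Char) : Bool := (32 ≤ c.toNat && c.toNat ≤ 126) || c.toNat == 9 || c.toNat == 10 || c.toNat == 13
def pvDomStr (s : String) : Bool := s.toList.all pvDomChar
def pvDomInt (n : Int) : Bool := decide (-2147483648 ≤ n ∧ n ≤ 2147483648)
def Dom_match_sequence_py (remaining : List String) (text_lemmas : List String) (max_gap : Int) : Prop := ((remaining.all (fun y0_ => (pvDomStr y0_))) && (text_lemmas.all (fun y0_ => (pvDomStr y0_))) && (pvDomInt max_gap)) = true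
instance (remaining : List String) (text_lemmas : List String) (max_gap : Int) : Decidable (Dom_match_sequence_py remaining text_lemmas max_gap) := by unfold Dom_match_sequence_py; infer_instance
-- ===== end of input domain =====

-- B replaces A's recursive slicing (two list copies per matched lemma) with one iterative
-- two-pointer index scan over the original list (objective: faster).

-- ===== PORT A =====
-- 'for i, lemma in enumerate(window): if lemma == target: return rec(i)' = first matching index, then recurse
def pyFindIdxA (target : String) : List String → Nat → Option Nat
  | [], _ => none
  | l :: ls, i => if l == target then some i else pyFindIdxA target ls (i + 1)

def match_sequence_py : List String → List String → Int → Bool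
  | [], _, _ => true
  | target :: rest, text_lemmas, max_gap =>
    match pyFindIdxA target (PySem.List.slice text_lemmas none (some (max_gap + 1))) 0 with
    | some i => match_sequence_py rest (PySem.List.slice text_lemmas (some ((i : Int) + 1)) none) max_gap
    | none => false

-- ===== PORT B =====
-- the 'while True' scan: advance j until a match (some j) or the window limit (none)
def altScan (tl : List String) (target : String) (limit : Int) (j : Nat) : Option Nat :=
  if (j : Int) < limit then
    if tl.getD j "" == target then some j
    else altScan tl target limit (j + 1)
  else none
termination_by (limit - (j : Int)).toNat
decreasing_by omega

-- the 'for target in remaining' loop carrying the index j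
def altLoop (tl : List String) (n : Nat) (g : Int) : List String → Nat → Bool
  | [], _ => true
  | target :: rest, j =>
    match altScan tl target (min (n : Int) ((j : Int) + g + 1)) j with
    | some k => altLoop tl n g rest (k + 1)
    | none => false

def match_sequence_py_alt (remaining : List String) (text_lemmas : List String) (max_gap : Int) : Bool :=
  altLoop text_lemmas text_lemmas.length max_gap remaining 0

-- ===== PRECONDITION & SPEC =====
-- Pre_ restricts to the natural domain max_gap ≥ -1: for max_gap ≤ -2 (a nonsensical negative gap
-- tolerance, which A still returns on) A's window text_lemmas[:max_gap+1] drops elements from the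
-- END of the list by Python's negative-slice semantics, an accident of A's implementation.
def Pre_match_sequence_py (remaining : List String) (text_lemmas : List String) (max_gap : Int) : Prop := -1 ≤ max_gap
instance (remaining : List String) (text_lemmas : List String) (max_gap : Int) : Decidable (Pre_match_sequence_py remaining text_lemmas max_gap) := by unfold Pre_match_sequence_py; infer_instance

def pvWitness_match_sequence_py : List String × List String × Int := (["a"], ["b", "a"], 1)

def Spec_match_sequence_py (remaining : List String) (text_lemmas : List String) (max_gap : Int) (out : Bool) : Prop := out = match_sequence_py_alt remaining text_lemmas max_gap
instance (remaining : List String) (text_lemmas : List String) (max_gap : Int) (out : Bool) : Decidable (Spec_match_sequence_py remaining text_lemmas max_gap out) := by unfold Spec_match_sequence_py; infer_instance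

-- ===== CLAIM (what is proved, stated in full; the proofs are below) =====
def Claim_equal_match_sequence_py : Prop := ∀ (remaining : List String) (text_lemmas : List String) (max_gap : Int), Dom_match_sequence_py remaining text_lemmas max_gap → Pre_match_sequence_py remaining text_lemmas max_gap → Spec_match_sequence_py remaining text_lemmas max_gap (match_sequence_py remaining text_lemmas max_gap)

-- ===== LEMMAS AND PROOFS =====

theorem pyFindIdxA_shift (t : String) (l : List String) (c : Nat) :
    pyFindIdxA t l c = (pyFindIdxA t l 0).map (· + c) := by
  induction l generalizing c with
  | nil => simp [pyFindIdxA]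
  | cons x xs ih =>
    by_cases h : (x == t) = true
    · simp [pyFindIdxA, h]
    · simp only [pyFindIdxA, h, if_neg, Bool.false_eq_true, not_false_eq_true]
      rw [ih (c + 1), ih 1, Option.map_map]
      congr 1
      funext i
      simp; omega

theorem altScan_eq_find (tl : List String) (t : String) (limit : Int) :
    ∀ (m j : Nat), (limit - (j : Int)).toNat = m →
    limit ≤ (tl.length : Int) →
    altScan tl t limit j = (pyFindIdxA t ((tl.drop j).take m) 0).map (· + j) := by
  intro m
  induction m with
  | zero =>
    intro j hm _
    have hj : ¬ ((j : Int) < limit) := by omega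
    rw [altScan]
    simp [hj, pyFindIdxA]
  | succ m ih =>
    intro j hm hlen
    have hjE : (j : Int) < limit := by omega
    have hj : j < tl.length := by omega
    have hdrop : tl.drop j = tl[j] :: tl.drop (j + 1) := List.drop_eq_getElem_cons hj
    have hgetD : tl.getD j "" = tl[j] := by
      simp [List.getD_eq_getElem?_getD, List.getElem?_eq_getElem hj]
    rw [altScan]
    simp only [hjE, if_pos, hgetD, hdrop, List.take_succ_cons]
    by_cases h : (tl[j] == t) = true
    · simp [pyFindIdxA, h]
    · simp only [pyFindIdxA, h, Bool.false_eq_true, not_false_eq_true, if_neg]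
      rw [ih (j + 1) (by omega) hlen,
          pyFindIdxA_shift t (List.take m (List.drop (j + 1) tl)) (0 + 1), Option.map_map]
      congr 1
      funext i
      simp; omega

theorem window_eq (tl : List String) (j : Nat) (g : Int) (hg : -1 ≤ g) :
    PySem.List.slice (tl.drop j) none (some (g + 1)) =
      (tl.drop j).take ((min (tl.length : Int) ((j : Int) + g + 1) - (j : Int)).toNat) := by
  rw [PySem.List.slice_to _ (by omega : (0:Int) ≤ g + 1)]
  exact List.take_eq_take_iff.mpr (by simp only [List.length_drop]; omega)

theorem loop_eq (tl : List String) (g : Int) (hg : -1 ≤ g) :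
    ∀ (remaining : List String) (j : Nat),
    match_sequence_py remaining (tl.drop j) g = altLoop tl tl.length g remaining j := by
  intro remaining
  induction remaining with
  | nil => intro j; rfl
  | cons target rest ih =>
    intro j
    rw [match_sequence_py, window_eq tl j g hg, altLoop,
        altScan_eq_find tl target (min (tl.length : Int) ((j : Int) + g + 1))
          ((min (tl.length : Int) ((j : Int) + g + 1) - (j : Int)).toNat) j rfl (by omega)]
    cases hfind : pyFindIdxA target
        ((tl.drop j).take ((min (tl.length : Int) ((j : Int) + g + 1) - (j : Int)).toNat)) 0 with
    | none => rfl
    | some i =>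
      simp only [Option.map_some]
      have hslice : PySem.List.slice (tl.drop j) (some ((i : Int) + 1)) none
          = tl.drop ((i + j) + 1) := by
        rw [(by push_cast; ring : ((i : Int) + 1) = (((i + 1 : Nat) : Nat) : Int)),
            PySem.List.slice_from_natCast, List.drop_drop]
        congr 1
        omega
      rw [hslice, ih ((i + j) + 1)]

-- ===== VERDICT (by name: the statement is the Claim_ definition above) =====
theorem match_sequence_py_spec : Claim_equal_match_sequence_py := by
  intro remaining tl g _ hg
  unfold Spec_match_sequence_py match_sequence_py_alt
  have := loop_eq tl g hg remaining 0
  simpa using this
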